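-- pv_equiv track=rewrite | github.com/hyeongiii/Algorithm_hyeongiii | 프로그래머스/unrated/135808. 과일 장수/과일 장수.py | solution
-- ===== SOURCE A (Python) =====
-- def solution(k, m, score):
--     answer = 0
--
--     score.sort(reverse = True)
--     a = len(score) // m
--
--     for i in range(a):
--         tmp = score[i*m:i*m+m]
--         price = min(tmp)
--         answer += price * m
--
--     return answer
-- ===== SOURCE B (Python) =====
-- def solution(k, m, score):
--     # frequency table + run-length merge: no slicing and no per-group min() scan
--     cnt = {}
--     for v in score:
--         cnt[v] = cnt.get(v, 0) + 1
--     vals = sorted(cnt, reverse=True)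
--     total = 0
--     vi = 0
--     covered = 0
--     for g in range(len(score) // m):
--         r = g * m + m - 1          # descending rank of this box's minimum
--         while covered <= r:
--             covered += cnt[vals[vi]]
--             vi += 1
--         total += vals[vi - 1]
--     return total * m
-- ===== Notes on version B (the rewrite author's own statement) =====
-- stated objective: alternative
-- what changed: A sorts the whole list descending and takes min() of each m-slice; B never sorts the n scores: it builds a value->count frequency table in one pass, sorts only the distinct values, and walks that run-length encoding with a cumulative-count pointer to pick each box's minimum.
import Mathlib
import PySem

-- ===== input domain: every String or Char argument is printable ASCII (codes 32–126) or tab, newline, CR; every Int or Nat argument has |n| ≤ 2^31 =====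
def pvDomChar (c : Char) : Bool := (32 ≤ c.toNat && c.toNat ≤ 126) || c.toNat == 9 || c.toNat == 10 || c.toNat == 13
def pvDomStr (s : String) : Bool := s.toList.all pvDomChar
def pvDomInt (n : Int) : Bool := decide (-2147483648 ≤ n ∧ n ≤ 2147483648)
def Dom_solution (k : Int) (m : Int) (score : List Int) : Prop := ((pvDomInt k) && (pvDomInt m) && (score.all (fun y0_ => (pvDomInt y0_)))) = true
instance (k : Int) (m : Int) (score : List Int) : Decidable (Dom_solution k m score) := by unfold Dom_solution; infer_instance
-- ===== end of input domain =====

-- B replaces A's full descending sort + min() over each m-slice by a value->count frequency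
-- table, a sort of the distinct values only, and a run-length merge with a cumulative-count
-- pointer; equivalence is about the RETURN value only (Python A sorts `score` in place, B does not).

-- ===== PORT A =====
def solution (k : Int) (m : Int) (score : List Int) : Int :=
  let s := PySem.List.sorted score (fun x => x) true
  let a := PySem.Int.floordiv (s.length : Int) m
  (PySem.List.pyRange 0 a 1).foldl (fun answer i =>
    let tmp := PySem.List.slice s (some (i * m)) (some (i * m + m))
    let price := (PySem.List.min? tmp (fun x => x)).getD 0
    answer + price * m) 0

-- ===== PORT B =====
-- the inner `while covered <= r` loop of Source B; `rest` is the still-unconsumed suffix of `vals`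
-- (Python reads vals[vi]; on an exhausted `rest` Python would raise IndexError — unreachable for m ≠ 0)
def pvAdvance (cnt : PySem.Dict Int Int) (r : Int) :
    List Int → Int → Int → List Int × Int × Int
  | rest, vi, covered =>
    if covered ≤ r then
      match rest with
      | [] => (rest, vi, covered)
      | v :: rest' => pvAdvance cnt r rest' (vi + 1) (covered + PySem.Dict.getD cnt v 0)
    else (rest, vi, covered)

def solution_alt (k : Int) (m : Int) (score : List Int) : Int :=
  let cnt := score.foldl (fun d v => d.insert v (d.getD v 0 + 1)) PySem.Dict.empty
  let vals := PySem.List.sorted cnt.keys (fun x => x) true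
  let st := (PySem.List.pyRange 0 (PySem.Int.floordiv (score.length : Int) m) 1).foldl
    (fun (st : Int × List Int × Int × Int) g =>
      let r := g * m + m - 1
      let res := pvAdvance cnt r st.2.1 st.2.2.1 st.2.2.2
      (st.1 + PySem.List.pyGetD vals (res.2.1 - 1) 0, res.1, res.2.1, res.2.2))
    (0, vals, 0, 0)
  st.1 * m

-- ===== PRECONDITION & SPEC =====
-- Pre_ excludes only m = 0, on which Python A raises ZeroDivisionError (len(score) // 0)
-- and Python B raises the same (len(score) // 0 in the range bound).
def Pre_solution (k : Int) (m : Int) (score : List Int) : Prop := m ≠ 0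
instance (k : Int) (m : Int) (score : List Int) : Decidable (Pre_solution k m score) := by unfold Pre_solution; infer_instance
def pvWitness_solution : Int × Int × List Int := (4, 2, [1, 2, 3, 1])

def Spec_solution (k : Int) (m : Int) (score : List Int) (out : Int) : Prop := out = solution_alt k m score
instance (k : Int) (m : Int) (score : List Int) (out : Int) : Decidable (Spec_solution k m score out) := by unfold Spec_solution; infer_instance

-- ===== CLAIM (what is proved, stated in full; the proofs are below) =====
def Claim_equal_solution : Prop := ∀ (k : Int) (m : Int) (score : List Int), Dom_solution k m score → Pre_solution k m score → Spec_solution k m score (solution k m score)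

-- ===== LEMMAS AND PROOFS =====

-- run-length expansion of a value list by the multiplicities it has in xs, its cumulative size,
-- and the descending list of distinct values of xs
def pvExp (xs vs : List Int) : List Int := vs.flatMap (fun v => List.replicate (xs.count v) v)
def pvCum (xs ps : List Int) : Int := ((ps.map (fun v => ((xs.count v : Nat) : Int))).sum)
def pvVals (xs : List Int) : List Int := PySem.List.sorted (PySem.Set.ofList xs) (fun x => x) true

theorem pvCum_eq_length (xs ps : List Int) : pvCum xs ps = ((pvExp xs ps).length : Int) := by
  simp [pvCum, pvExp, List.length_flatMap, Nat.cast_list_sum, List.map_map]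
  rfl

theorem pvCum_append_singleton (xs ps : List Int) (v : Int) :
    pvCum xs (ps ++ [v]) = pvCum xs ps + (xs.count v : Int) := by
  simp [pvCum]

theorem pv_exp_count (xs : List Int) (vs : List Int) (hnd : vs.Nodup) (w : Int) :
    (pvExp xs vs).count w = if w ∈ vs then xs.count w else 0 := by
  induction vs with
  | nil => simp [pvExp]
  | cons v rest ih =>
    have hnd' := (List.nodup_cons.mp hnd)
    simp only [pvExp, List.flatMap_cons, List.count_append, List.count_replicate]
    have ihe := ih hnd'.2
    simp only [pvExp] at ihe
    rw [ihe]
    by_cases hw : w = v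
    · subst hw
      simp [hnd'.1]
    · simp [hw, List.mem_cons, Ne.symm hw, beq_iff_eq]

theorem pv_vals_strict (xs : List Int) : (pvVals xs).Pairwise (fun a b => b < a) := by
  have h1 := PySem.List.sorted_pairwise_rev (PySem.Set.ofList xs) (fun x : Int => x)
  have h2 : (pvVals xs).Nodup :=
    (PySem.List.sorted_perm (PySem.Set.ofList xs) (fun x : Int => x) true).nodup_iff.mpr
      (PySem.Set.nodup_ofList xs)
  exact (h1.and h2).imp (fun h => lt_of_le_of_ne h.1 (Ne.symm h.2))

theorem pv_exp_perm (xs : List Int) : (pvExp xs (pvVals xs)).Perm xs := by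
  rw [List.perm_iff_count]
  intro w
  have hnd : (pvVals xs).Nodup :=
    (PySem.List.sorted_perm (PySem.Set.ofList xs) (fun x : Int => x) true).nodup_iff.mpr
      (PySem.Set.nodup_ofList xs)
  rw [pv_exp_count xs _ hnd w]
  have hmem : w ∈ pvVals xs ↔ w ∈ xs := by
    rw [pvVals, PySem.List.mem_sorted, PySem.Set.mem_ofList]
  by_cases h : w ∈ xs
  · simp [hmem, h]
  · simp [hmem, h, List.count_eq_zero_of_not_mem h]

theorem pv_exp_pairwise (xs vs : List Int) (h : vs.Pairwise (fun a b => b < a)) :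
    (pvExp xs vs).Pairwise (fun a b : Int => b ≤ a) := by
  induction vs with
  | nil => simp [pvExp]
  | cons v rest ih =>
    have h' := List.pairwise_cons.mp h
    simp only [pvExp, List.flatMap_cons]
    rw [List.pairwise_append]
    refine ⟨List.pairwise_replicate.mpr (by simp), ih h'.2, ?_⟩
    intro a ha b hb
    have hav : a = v := List.eq_of_mem_replicate ha
    obtain ⟨w, hw, hbw⟩ := List.mem_flatMap.mp hb
    have hbw' : b = w := List.eq_of_mem_replicate hbw
    rw [hav, hbw']
    exact le_of_lt (h'.1 w hw)

-- the descending sort of xs IS the run-length expansion of its distinct values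
theorem pv_u_eq (xs : List Int) :
    PySem.List.sorted xs (fun x => x) true = pvExp xs (pvVals xs) := by
  apply List.eq_of_perm_of_sorted (le := fun a b : Int => b ≤ a)
  · intro a b _ _ h1 h2; exact le_antisymm h2 h1
  · exact PySem.List.sorted_pairwise_rev xs (fun x => x)
  · exact pv_exp_pairwise xs _ (pv_vals_strict xs)
  · exact (PySem.List.sorted_perm xs (fun x : Int => x) true).trans (pv_exp_perm xs).symm

theorem pvCum_vals (xs : List Int) : pvCum xs (pvVals xs) = (xs.length : Int) := by
  rw [pvCum_eq_length, (pv_exp_perm xs).length_eq]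

-- min over a contiguous nonincreasing chunk is its last element
theorem pv_min_chunk (u : List Int) (hu : u.Pairwise (fun a b => b ≤ a))
    (j c : Nat) (hc : 0 < c) (hlen : j + c ≤ u.length) :
    (PySem.List.min? ((u.drop j).take c) (fun x => x)).getD 0 = u.getD (j + c - 1) 0 := by
  have hdl : (u.drop j).length = u.length - j := u.length_drop
  have hchl : ((u.drop j).take c).length = c := by
    rw [List.length_take, hdl]; omega
  have hne : (u.drop j).take c ≠ [] := by
    intro h; rw [h] at hchl; simp at hchl; omega
  set ch := (u.drop j).take c with hch
  have hpair : ch.Pairwise (fun a b => b ≤ a) :=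
    List.Pairwise.sublist ((List.take_sublist _ _).trans (List.drop_sublist _ _)) hu
  obtain ⟨v, hv⟩ : ∃ v, PySem.List.min? ch (fun x => x) = some v := by
    cases hmin : PySem.List.min? ch (fun x => x) with
    | none => exact absurd ((PySem.List.min?_eq_none_iff ch _).1 hmin) hne
    | some v => exact ⟨v, rfl⟩
  have hlast_lt : c - 1 < ch.length := by omega
  have hlast_mem : ch[c-1] ∈ ch := List.getElem_mem _
  have hv_le : v ≤ ch[c-1] := PySem.List.min?_isMin hv _ hlast_mem
  have hle_v : ch[c-1] ≤ v := by
    obtain ⟨p, hp, hpe⟩ := List.mem_iff_getElem.1 (PySem.List.min?_mem hv)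
    rcases Nat.lt_or_ge p (c - 1) with h | h
    · have := (List.pairwise_iff_getElem.1 hpair) p (c-1) hp hlast_lt h
      rw [hpe] at this; exact this
    · have : p = c - 1 := by omega
      subst this; rw [hpe]
  have hveq : v = ch[c-1] := le_antisymm hv_le hle_v
  have hidx : ch[c-1] = u.getD (j + c - 1) 0 := by
    have h1 : ch[c-1]'hlast_lt = (u.drop j)[c-1]'(by omega) := by
      simp [hch, List.getElem_take]
    have h2 : (u.drop j)[c-1]'(by rw [hdl]; omega) = u[j + (c-1)]'(by omega) := by
      simp [List.getElem_drop]
    rw [h1, h2, List.getD_eq_getElem u 0 (by omega : j + c - 1 < u.length)]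
    congr 1; omega
  rw [hv, Option.getD_some, hveq, hidx]

-- A computes: for each of the len//m boxes, the element at descending rank g*m+m-1, times m
theorem pv_A_char (k m : Int) (score : List Int) (hm : 0 < m) :
    solution k m score
      = ((List.range (score.length / m.toNat)).map
          (fun g => (PySem.List.sorted score (fun x => x) true).getD (g * m.toNat + m.toNat - 1) 0 * m)).sum := by
  set u := PySem.List.sorted score (fun x => x) true with hu
  set m' := m.toNat with hm'
  have hmc : m = (m' : Int) := by omega
  have hm'pos : 0 < m' := by omega
  set n := score.length with hn
  have hul : u.length = n := PySem.List.length_sorted score _ true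
  set A := n / m' with hA
  have hfd : PySem.Int.floordiv (u.length : Int) m = (A : Int) := by
    rw [hul, hmc, PySem.Int.floordiv_natCast]
  have hrange : PySem.List.pyRange 0 (A : Int) 1
      = (List.range A).map (fun k0 : Nat => (k0 : Int)) := by
    rw [PySem.List.pyRange_one]; simp
  show (PySem.List.pyRange 0 (PySem.Int.floordiv (u.length : Int) m) 1).foldl _ 0 = _
  rw [hfd, hrange, PySem.List.foldl_add, zero_add, List.map_map]
  congr 1
  apply List.map_congr_left
  intro g hg
  have hgA : g < A := List.mem_range.mp hg
  show (PySem.List.min? (PySem.List.slice u (some ((g : Int) * m)) (some ((g : Int) * m + m)))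
      (fun x => x)).getD 0 * m = u.getD (g * m' + m' - 1) 0 * m
  have hsl : PySem.List.slice u (some ((g : Int) * m)) (some ((g : Int) * m + m))
      = (u.drop (g * m')).take m' := by
    have h1 : (g : Int) * m = ((g * m' : Nat) : Int) := by push_cast [hmc]; ring
    have h2 : (g : Int) * m + m = ((g * m' : Nat) : Int) + ((m' : Nat) : Int) := by
      push_cast [hmc]; ring
    rw [h2, h1, PySem.List.slice_natCast_add]
  have hbound : g * m' + m' ≤ u.length := by
    rw [hul]
    have h1 : (g + 1) * m' ≤ A * m' := Nat.mul_le_mul_right m' (by omega)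
    have h2 : A * m' ≤ n := by rw [hA]; exact Nat.div_mul_le_self n m'
    calc g * m' + m' = (g + 1) * m' := by ring
      _ ≤ A * m' := h1
      _ ≤ n := h2
  rw [hsl, pv_min_chunk u (PySem.List.sorted_pairwise_rev score (fun x => x)) (g * m') m' hm'pos hbound]

-- what the inner while loop computes: it consumes values until the cumulative count exceeds r
theorem pv_adv (xs : List Int) (r : Int) (hr : 0 ≤ r) :
    ∀ (rest pre : List Int), r < pvCum xs (pre ++ rest) →
    (pre ≠ [] → pvCum xs pre.dropLast ≤ r) →
    ∃ pre' rest', pre' ≠ [] ∧ pre' ++ rest' = pre ++ rest ∧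
      pvAdvance (PySem.Dict.counter xs) r rest (pre.length : Int) (pvCum xs pre)
        = (rest', (pre'.length : Int), pvCum xs pre') ∧
      pvCum xs pre'.dropLast ≤ r ∧ r < pvCum xs pre' := by
  intro rest
  induction rest with
  | nil =>
    intro pre hlt hdl
    have hne : pre ≠ [] := by
      intro h; subst h; simp [pvCum] at hlt; omega
    refine ⟨pre, [], hne, rfl, ?_, hdl hne, by simpa using hlt⟩
    rw [pvAdvance]
    simp at hlt
    rw [if_neg (by omega)]
  | cons v rest2 ih =>
    intro pre hlt hdl
    by_cases hcov : pvCum xs pre ≤ r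
    · have hstep : pvAdvance (PySem.Dict.counter xs) r (v :: rest2) (pre.length : Int) (pvCum xs pre)
          = pvAdvance (PySem.Dict.counter xs) r rest2 ((pre.length : Int) + 1)
              (pvCum xs pre + ((xs.count v : Nat) : Int)) := by
        rw [pvAdvance, if_pos hcov, PySem.Dict.getD_counter]
      have hlen : ((pre ++ [v]).length : Int) = (pre.length : Int) + 1 := by simp
      have hcum : pvCum xs (pre ++ [v]) = pvCum xs pre + ((xs.count v : Nat) : Int) :=
        pvCum_append_singleton xs pre v
      obtain ⟨pre', rest', h1, h2, h3, h4, h5⟩ := ih (pre ++ [v])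
        (by rw [List.append_assoc]; simpa using hlt)
        (by intro _; rw [List.dropLast_concat]; exact hcov)
      refine ⟨pre', rest', h1, by simpa using h2, ?_, h4, h5⟩
      rw [hstep, ← hcum, ← hlen, h3]
    · refine ⟨pre, v :: rest2, ?_, rfl, ?_, ?_, by omega⟩
      · intro h; subst h; simp [pvCum] at hcov; omega
      · rw [pvAdvance, if_neg hcov]
      · exact hdl (by intro h; subst h; simp [pvCum] at hcov; omega)

-- element of the run-length expansion at a rank inside the last run of pre'
theorem pv_exp_getD (xs pre' rest' : List Int) (h : pre' ≠ [])
    (r : Int) (h0 : 0 ≤ r) (h1 : pvCum xs pre'.dropLast ≤ r) (h2 : r < pvCum xs pre') :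
    (pvExp xs (pre' ++ rest')).getD r.toNat 0 = pre'.getLast h := by
  obtain ⟨ps, last, rfl⟩ : ∃ ps last, pre' = ps ++ [last] := by
    rcases List.eq_nil_or_concat pre' with h' | ⟨ps, last, h'⟩
    · exact absurd h' h
    · exact ⟨ps, last, by simpa using h'⟩
  rw [List.getLast_append_singleton]
  have hdl : (ps ++ [last]).dropLast = ps := List.dropLast_concat ..
  rw [hdl] at h1
  have hcum : pvCum xs (ps ++ [last]) = pvCum xs ps + (xs.count last : Int) :=
    pvCum_append_singleton xs ps last
  have hLps : pvCum xs ps = ((pvExp xs ps).length : Int) := pvCum_eq_length xs ps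
  have hexp : pvExp xs ((ps ++ [last]) ++ rest')
      = pvExp xs ps ++ (List.replicate (xs.count last) last ++ pvExp xs rest') := by
    simp [pvExp, List.flatMap_append]
  rw [hexp]
  have hj1 : (pvExp xs ps).length ≤ r.toNat := by omega
  have hj2 : r.toNat < (pvExp xs ps).length + xs.count last := by omega
  have hlen_tot : r.toNat < ((pvExp xs ps) ++ (List.replicate (xs.count last) last ++ pvExp xs rest')).length := by
    simp; omega
  rw [List.getD_eq_getElem _ 0 hlen_tot, List.getElem_append_right hj1,
    List.getElem_append_left (by simp; omega), List.getElem_replicate]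

theorem pv_prefix_getD (pre' rest' : List Int) (h : pre' ≠ []) :
    PySem.List.pyGetD (pre' ++ rest') ((pre'.length : Int) - 1) 0 = pre'.getLast h := by
  have hl : 0 < pre'.length := List.length_pos_iff.mpr h
  have : ((pre'.length : Int) - 1) = ((pre'.length - 1 : Nat) : Int) := by omega
  rw [this, PySem.List.pyGetD_natCast,
    List.getD_eq_getElem _ 0 (by simp; omega),
    List.getElem_append_left (by omega), List.getLast_eq_getElem]

-- invariant of B's outer loop: after G boxes the state is a split of vals into a consumed
-- prefix and the rest, the covered count is the prefix's cumulative multiplicity, and the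
-- running total is the sum of the expansion's elements at ranks g*m+m-1
theorem pv_outer (score : List Int) (m : Int) (hm : 0 < m) :
    ∀ G : Nat, G * m.toNat ≤ score.length →
    ∃ pre rest, pre ++ rest = pvVals score ∧
      ((List.range G).map (fun g : Nat => (g : Int))).foldl
        (fun (st : Int × List Int × Int × Int) g =>
          let r := g * m + m - 1
          let res := pvAdvance (PySem.Dict.counter score) r st.2.1 st.2.2.1 st.2.2.2
          (st.1 + PySem.List.pyGetD (pvVals score) (res.2.1 - 1) 0, res.1, res.2.1, res.2.2))
        (0, pvVals score, 0, 0)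
      = (((List.range G).map (fun g => (pvExp score (pvVals score)).getD (g * m.toNat + m.toNat - 1) 0)).sum,
         rest, (pre.length : Int), pvCum score pre)
      ∧ (G = 0 → pre = []) ∧
        (G ≠ 0 → pre ≠ [] ∧ pvCum score pre.dropLast ≤ (((G - 1) * m.toNat + m.toNat - 1 : Nat) : Int)) := by
  set m' := m.toNat with hm'
  have hmc : m = (m' : Int) := by omega
  have hm'pos : 0 < m' := by omega
  intro G
  induction G with
  | zero =>
    intro _
    exact ⟨[], pvVals score, by simp, by simp [pvCum], fun _ => rfl, fun h => absurd rfl h⟩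
  | succ G ih =>
    intro hle
    obtain ⟨pre, rest, hsplit, hfold, h0, hpos⟩ := ih (by nlinarith [hm'pos])
    set rN : Nat := G * m' + m' - 1 with hrN
    have hr_eq : (G : Int) * m + m - 1 = ((rN : Nat) : Int) := by
      rw [hrN]; push_cast [hmc]; omega
    have hr0 : (0 : Int) ≤ ((rN : Nat) : Int) := by positivity
    have hrlt : ((rN : Nat) : Int) < pvCum score (pre ++ rest) := by
      rw [hsplit, pvCum_vals]
      have h1 : (G + 1) * m' ≤ score.length := hle
      have h2 : G * m' + m' ≤ score.length := by rw [Nat.succ_mul] at h1; omega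
      exact_mod_cast (by omega : rN < score.length)
    have hdl : pre ≠ [] → pvCum score pre.dropLast ≤ ((rN : Nat) : Int) := by
      intro hne
      rcases Nat.eq_zero_or_pos G with hG | hG
      · exact absurd (h0 (by omega)) hne
      · obtain ⟨_, hb⟩ := hpos (by omega)
        refine hb.trans ?_
        have : (G - 1) * m' + m' - 1 ≤ rN := by
          have h1 : (G - 1) * m' ≤ G * m' := Nat.mul_le_mul_right m' (Nat.sub_le G 1)
          omega
        exact_mod_cast this
    obtain ⟨pre', rest', hne', happ', hadv', hdl', hlt'⟩ :=
      pv_adv score ((rN : Nat) : Int) hr0 rest pre hrlt hdl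
    have hvals' : pre' ++ rest' = pvVals score := by rw [happ', hsplit]
    refine ⟨pre', rest', hvals', ?_, by omega, fun _ => ⟨hne', by simpa [hrN] using hdl'⟩⟩
    rw [List.range_succ, List.map_append, List.foldl_append, hfold]
    simp only [List.map_cons, List.map_nil, List.foldl_cons, List.foldl_nil]
    rw [hr_eq, hadv']
    have hget : PySem.List.pyGetD (pvVals score) ((pre'.length : Int) - 1) 0 = pre'.getLast hne' := by
      rw [← hvals']; exact pv_prefix_getD pre' rest' hne'
    have hexp : (pvExp score (pvVals score)).getD rN 0 = pre'.getLast hne' := by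
      have := pv_exp_getD score pre' rest' hne' ((rN : Nat) : Int) hr0 hdl' hlt'
      rw [hvals'] at this
      simpa using this
    simp only [List.range_succ, List.map_append, List.sum_append, List.map_cons, List.map_nil,
      List.sum_cons, List.sum_nil]
    rw [hget, hexp]
    simp

theorem pv_equal_pos (k m : Int) (score : List Int) (hm : 0 < m) :
    solution k m score = solution_alt k m score := by
  set m' := m.toNat with hm'
  have hmc : m = (m' : Int) := by omega
  set n := score.length with hn
  set A := n / m' with hA
  have hB : solution_alt k m score
      = (((List.range A).map
          (fun g => (pvExp score (pvVals score)).getD (g * m' + m' - 1) 0)).sum) * m := by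
    obtain ⟨pre, rest, hsplit, hfold, _, _⟩ :=
      pv_outer score m hm A (by rw [hA]; exact Nat.div_mul_le_self n m')
    have hv : PySem.List.sorted (PySem.Set.ofList score) (fun x => x) true = pvVals score := rfl
    have hfd : PySem.Int.floordiv ((n : Nat) : Int) m = ((A : Nat) : Int) := by
      rw [hmc, PySem.Int.floordiv_natCast]
    have hrange : PySem.List.pyRange 0 ((A : Nat) : Int) 1
        = (List.range A).map (fun k0 : Nat => (k0 : Int)) := by
      rw [PySem.List.pyRange_one]; simp
    simp only [solution_alt, PySem.Dict.foldl_insert_getD_add_one_eq_counter,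
      PySem.Dict.keys_counter, hv, ← hn, hfd, hrange, hfold]
    rfl
  rw [hB, pv_A_char k m score hm, ← pv_u_eq score]
  rw [show ((List.range A).map (fun g =>
      (PySem.List.sorted score (fun x => x) true).getD (g * m' + m' - 1) 0 * m)).sum
      = ∑ g ∈ Finset.range A, (PySem.List.sorted score (fun x => x) true).getD (g * m' + m' - 1) 0 * m from rfl]
  rw [show ((List.range A).map (fun g =>
      (PySem.List.sorted score (fun x => x) true).getD (g * m' + m' - 1) 0)).sum
      = ∑ g ∈ Finset.range A, (PySem.List.sorted score (fun x => x) true).getD (g * m' + m' - 1) 0 from rfl]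
  rw [Finset.sum_mul]

theorem pv_equal_neg (k m : Int) (score : List Int) (hm : m < 0) :
    solution k m score = solution_alt k m score := by
  have hA : solution k m score = 0 := by
    have hN : (0 : Int) ≤ ((PySem.List.sorted score (fun x => x) true).length : Int) := by positivity
    have hfd : PySem.Int.floordiv ((PySem.List.sorted score (fun x => x) true).length : Int) m ≤ 0 :=
      Int.fdiv_nonpos_of_nonneg_of_nonpos hN (le_of_lt hm)
    show (PySem.List.pyRange 0 (PySem.Int.floordiv _ m) 1).foldl _ 0 = 0
    rw [PySem.List.pyRange_one_eq_nil hfd]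
    rfl
  have hB : solution_alt k m score = 0 := by
    have hN : (0 : Int) ≤ ((score.length : Nat) : Int) := by positivity
    have hfd : PySem.Int.floordiv ((score.length : Nat) : Int) m ≤ 0 :=
      Int.fdiv_nonpos_of_nonneg_of_nonpos hN (le_of_lt hm)
    simp only [solution_alt]
    rw [PySem.List.pyRange_one_eq_nil hfd]
    simp
  rw [hA, hB]

-- ===== VERDICT (by name: the statement is the Claim_ definition above) =====
theorem solution_spec : Claim_equal_solution := by
  intro k m score _ hpre
  unfold Spec_solution
  rcases lt_or_gt_of_ne hpre with hm | hm
  · exact pv_equal_neg k m score hm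
  · exact pv_equal_pos k m score hm
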